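-- pv_equiv track=rewrite | github.com/Sandra-M20/Adaptive-Stutter-correction | accuracy_tester.py | calculate_stuttering_metrics
-- ===== SOURCE A (Python) =====
-- from typing import Dict, List, Tuple
--
-- def calculate_stuttering_metrics(original: str, corrected: str) -> Dict:
--     """
--     Calculate detailed stuttering metrics for accuracy assessment.
--     """
--     metrics = {
--         'word_repetitions_removed': 0,
--         'sound_repetitions_removed': 0,
--         'prolongations_removed': 0,
--         'long_pauses_removed': 0,
--         'filler_words_removed': 0,
--         'total_issues_original': 0,
--         'total_issues_corrected': 0
--     }
--
--     # Count word repetitions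
--     original_words = original.lower().split()
--     corrected_words = corrected.lower().split()
--
--     # Simple repetition detection
--     for i in range(1, len(original_words)):
--         if original_words[i] == original_words[i-1]:
--             metrics['word_repetitions_removed'] += 1
--
--     # Count sound repetitions (repeated characters)
--     for i in range(2, len(original)):
--         if original[i] == original[i-1] == original[i-2]:
--             metrics['sound_repetitions_removed'] += 1
--
--     # Count prolongations (extended characters - simplified)
--     prolonged_chars = ['a', 'e', 'i', 'o', 'u', 'r', 's', 'l']
--     for char in prolonged_chars:
--         if char * 3 in original.lower():
--             metrics['prolongations_removed'] += original.lower().count(char * 3)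
--
--     # Count long pauses (...)
--     metrics['long_pauses_removed'] = original.count('...')
--
--     # Count filler words
--     filler_words = ['um', 'uh', 'like', 'basically', 'well']
--     for filler in filler_words:
--         metrics['filler_words_removed'] += original.lower().split().count(filler)
--
--     # Calculate total issues
--     metrics['total_issues_original'] = (
--         metrics['word_repetitions_removed'] +
--         metrics['sound_repetitions_removed'] +
--         metrics['prolongations_removed'] +
--         metrics['long_pauses_removed'] +
--         metrics['filler_words_removed']
--     )
--
--     # Recalculate for corrected text
--     corrected_metrics = {
--         'word_repetitions': 0,
--         'sound_repetitions': 0,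
--         'prolongations': 0,
--         'long_pauses': 0,
--         'filler_words': 0
--     }
--
--     corrected_words = corrected.lower().split()
--     for i in range(1, len(corrected_words)):
--         if corrected_words[i] == corrected_words[i-1]:
--             corrected_metrics['word_repetitions'] += 1
--
--     for i in range(2, len(corrected)):
--         if corrected[i] == corrected[i-1] == corrected[i-2]:
--             corrected_metrics['sound_repetitions'] += 1
--
--     for char in prolonged_chars:
--         if char * 3 in corrected.lower():
--             corrected_metrics['prolongations'] += corrected.lower().count(char * 3)
--
--     corrected_metrics['long_pauses'] = corrected.count('...')
--
--     for filler in filler_words: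
--         corrected_metrics['filler_words'] += corrected.lower().split().count(filler)
--
--     metrics['total_issues_corrected'] = (
--         corrected_metrics['word_repetitions'] +
--         corrected_metrics['sound_repetitions'] +
--         corrected_metrics['prolongations'] +
--         corrected_metrics['long_pauses'] +
--         corrected_metrics['filler_words']
--     )
--
--     return metrics
-- ===== SOURCE B (Python) =====
-- def _runs(seq):
--     """Run-length encode seq: list of (element, run_length)."""
--     runs = []
--     i = 0
--     n = len(seq)
--     while i < n:
--         j = i + 1
--         while j < n and seq[j] == seq[i]:
--             j += 1
--         runs.append((seq[i], j - i))
--         i = j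
--     return runs
--
--
-- _FILLERS = ('um', 'uh', 'like', 'basically', 'well')
--
--
-- def _counts(text):
--     """(word_reps, sound_reps, prolongations, long_pauses, fillers) for one text."""
--     low = text.lower()
--     words = low.split()
--     word_reps = sum(n - 1 for _, n in _runs(words))
--     sound_reps = sum(n - 2 for _, n in _runs(list(text)) if n > 2)
--     prolongations = sum(low.count(c * 3) for c in 'aeioursl' if c * 3 in low)
--     long_pauses = text.count('...')
--     fillers = sum(1 for w in words if w in _FILLERS)
--     return word_reps, sound_reps, prolongations, long_pauses, fillers
--
--
-- def calculate_stuttering_metrics(original: str, corrected: str) -> dict: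
--     wr, sr, pr, lp, fw = _counts(original)
--     return {
--         'word_repetitions_removed': wr,
--         'sound_repetitions_removed': sr,
--         'prolongations_removed': pr,
--         'long_pauses_removed': lp,
--         'filler_words_removed': fw,
--         'total_issues_original': wr + sr + pr + lp + fw,
--         'total_issues_corrected': sum(_counts(corrected)),
--     }
-- ===== Notes on version B (the rewrite author's own statement) =====
-- stated objective: alternative
-- what changed: The duplicated per-text block becomes one shared helper that run-length encodes words and characters, deriving word repetitions as sum(run-1) and sound repetitions as sum(run-2 for runs>2), and counts filler words by one membership pass instead of five .count passes.
import Mathlib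
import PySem

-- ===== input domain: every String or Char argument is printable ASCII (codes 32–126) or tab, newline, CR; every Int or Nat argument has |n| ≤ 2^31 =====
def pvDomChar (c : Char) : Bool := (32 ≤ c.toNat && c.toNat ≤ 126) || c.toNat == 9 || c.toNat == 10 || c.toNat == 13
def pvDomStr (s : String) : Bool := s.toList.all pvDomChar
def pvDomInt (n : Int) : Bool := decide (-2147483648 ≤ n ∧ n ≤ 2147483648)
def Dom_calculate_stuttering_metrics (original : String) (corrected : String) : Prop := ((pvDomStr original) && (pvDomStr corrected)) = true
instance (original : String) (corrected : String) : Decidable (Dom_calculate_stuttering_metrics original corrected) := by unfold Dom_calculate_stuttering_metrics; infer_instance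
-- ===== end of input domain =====

-- B replaces A's duplicated per-text metric block by one shared helper that run-length
-- encodes words/characters and counts fillers by a single membership pass (objective: alternative).

-- ===== PORT A =====

-- Python's `char * 3` for the one-character strings in prolonged_chars
def pvTriple (s : String) : String := String.ofList (s.toList ++ s.toList ++ s.toList)

def calculate_stuttering_metrics (original : String) (corrected : String) : List (String × Int) :=
  -- original_words = original.lower().split()
  let original_words := PySem.Str.split₀ (PySem.Str.lower original)
  -- for i in range(1, len(original_words)): if original_words[i] == original_words[i-1]: +1
  let wr : Int := (PySem.List.pyRange 1 (original_words.length : Int) 1).foldl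
    (fun acc i => if PySem.List.pyGetD original_words i "" == PySem.List.pyGetD original_words (i-1) "" then acc + 1 else acc) 0
  -- for i in range(2, len(original)): if original[i] == original[i-1] == original[i-2]: +1
  let sr : Int := (PySem.List.pyRange 2 (PySem.Str.len original) 1).foldl
    (fun acc i => if (PySem.Str.pyGet? original i == PySem.Str.pyGet? original (i-1)) &&
                     (PySem.Str.pyGet? original (i-1) == PySem.Str.pyGet? original (i-2)) then acc + 1 else acc) 0
  -- for char in prolonged_chars: if char*3 in original.lower(): += original.lower().count(char*3)
  let prolonged_chars := ["a", "e", "i", "o", "u", "r", "s", "l"]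
  let pr : Int := prolonged_chars.foldl
    (fun acc ch => if PySem.Str.isIn (pvTriple ch) (PySem.Str.lower original)
                   then acc + (PySem.Str.count (PySem.Str.lower original) (pvTriple ch) : Int) else acc) 0
  -- original.count('...')
  let lp : Int := (PySem.Str.count original "..." : Int)
  -- for filler in filler_words: += original.lower().split().count(filler)
  let filler_words := ["um", "uh", "like", "basically", "well"]
  let fw : Int := filler_words.foldl
    (fun acc f => acc + ((PySem.Str.split₀ (PySem.Str.lower original)).count f : Int)) 0
  let total_o := wr + sr + pr + lp + fw
  -- recalculate for corrected text
  let corrected_words := PySem.Str.split₀ (PySem.Str.lower corrected)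
  let cwr : Int := (PySem.List.pyRange 1 (corrected_words.length : Int) 1).foldl
    (fun acc i => if PySem.List.pyGetD corrected_words i "" == PySem.List.pyGetD corrected_words (i-1) "" then acc + 1 else acc) 0
  let csr : Int := (PySem.List.pyRange 2 (PySem.Str.len corrected) 1).foldl
    (fun acc i => if (PySem.Str.pyGet? corrected i == PySem.Str.pyGet? corrected (i-1)) &&
                     (PySem.Str.pyGet? corrected (i-1) == PySem.Str.pyGet? corrected (i-2)) then acc + 1 else acc) 0
  let cpr : Int := prolonged_chars.foldl
    (fun acc ch => if PySem.Str.isIn (pvTriple ch) (PySem.Str.lower corrected)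
                   then acc + (PySem.Str.count (PySem.Str.lower corrected) (pvTriple ch) : Int) else acc) 0
  let clp : Int := (PySem.Str.count corrected "..." : Int)
  let cfw : Int := filler_words.foldl
    (fun acc f => acc + ((PySem.Str.split₀ (PySem.Str.lower corrected)).count f : Int)) 0
  let total_c := cwr + csr + cpr + clp + cfw
  [("word_repetitions_removed", wr), ("sound_repetitions_removed", sr),
   ("prolongations_removed", pr), ("long_pauses_removed", lp), ("filler_words_removed", fw),
   ("total_issues_original", total_o), ("total_issues_corrected", total_c)]

-- ===== PORT B =====

-- the inner `while k < len(rest) and rest[k] == x: k += 1` of _runs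
def pvRunLen {α : Type} [BEq α] (x : α) : List α → Nat
  | [] => 0
  | y :: t => if y == x then pvRunLen x t + 1 else 0

-- _runs: run-length encoding by recursion on the remaining suffix
def pvRuns {α : Type} [BEq α] : List α → List (α × Nat)
  | [] => []
  | x :: rest =>
    let k := pvRunLen x rest
    (x, k + 1) :: pvRuns (rest.drop k)
termination_by l => l.length
decreasing_by simp only [List.length_drop, List.length_cons]; omega

-- _counts: the five per-text counts
def pvCounts (text : String) : Int × Int × Int × Int × Int :=
  let low := PySem.Str.lower text
  let words := PySem.Str.split₀ low
  let word_reps : Int := ((pvRuns words).map (fun r => (r.2 : Int) - 1)).sum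
  let sound_reps : Int := (((pvRuns text.toList).filter (fun r => decide (2 < r.2))).map (fun r => (r.2 : Int) - 2)).sum
  let prolongations : Int := (("aeioursl".toList).map
    (fun c => if PySem.Str.isIn (String.ofList [c, c, c]) low then (PySem.Str.count low (String.ofList [c, c, c]) : Int) else 0)).sum
  let long_pauses : Int := (PySem.Str.count text "..." : Int)
  let fillers : Int := ((words.filter (fun w => decide (w ∈ ["um", "uh", "like", "basically", "well"]))).length : Int)
  (word_reps, sound_reps, prolongations, long_pauses, fillers)

def calculate_stuttering_metrics_alt (original : String) (corrected : String) : List (String × Int) :=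
  let (wr, sr, pr, lp, fw) := pvCounts original
  let (cwr, csr, cpr, clp, cfw) := pvCounts corrected
  [("word_repetitions_removed", wr), ("sound_repetitions_removed", sr),
   ("prolongations_removed", pr), ("long_pauses_removed", lp), ("filler_words_removed", fw),
   ("total_issues_original", wr + sr + pr + lp + fw),
   ("total_issues_corrected", cwr + csr + cpr + clp + cfw)]

-- ===== PRECONDITION & SPEC =====
def Spec_calculate_stuttering_metrics (original : String) (corrected : String) (out : List (String × Int)) : Prop := out = calculate_stuttering_metrics_alt original corrected
instance (original : String) (corrected : String) (out : List (String × Int)) : Decidable (Spec_calculate_stuttering_metrics original corrected out) := by unfold Spec_calculate_stuttering_metrics; infer_instance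

-- ===== CLAIM (what is proved, stated in full; the proofs are below) =====
def Claim_equal_calculate_stuttering_metrics : Prop := ∀ (original : String) (corrected : String), Dom_calculate_stuttering_metrics original corrected → Spec_calculate_stuttering_metrics original corrected (calculate_stuttering_metrics original corrected)

-- ===== LEMMAS AND PROOFS =====

-- adjacent-equal-pair count (what A's word-repetition loop computes)
def pvAdjC {α : Type} [BEq α] : List α → Nat
  | x :: y :: t => (if x == y then 1 else 0) + pvAdjC (y :: t)
  | _ => 0

-- adjacent-equal-triple count (what A's sound-repetition loop computes)
def pvTriC {α : Type} [BEq α] : List α → Nat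
  | x :: y :: z :: t => (if x == y && y == z then 1 else 0) + pvTriC (y :: z :: t)
  | _ => 0

theorem pvRunLen_eq {α : Type} [BEq α] (x : α) (l : List α) :
    pvRunLen x l = (l.takeWhile (fun y => y == x)).length := by
  induction l with
  | nil => rfl
  | cons y t ih => by_cases h : (y == x) <;> simp [pvRunLen, h, ih]

theorem drop_takeWhile_len {α : Type} (p : α → Bool) (l : List α) :
    l.drop (l.takeWhile p).length = l.dropWhile p := by
  induction l with
  | nil => simp
  | cons x t ih => by_cases h : p x <;> simp [h, ih]

theorem head_dropWhile_false {α : Type} (p : α → Bool) (l : List α) (y : α)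
    (h : (l.dropWhile p).head? = some y) : p y = false := by
  induction l with
  | nil => simp at h
  | cons x t ih =>
    by_cases hx : p x
    · simp [hx] at h; exact ih h
    · simp [hx] at h; simp [← h, hx]

theorem pvRuns_cons {α : Type} [BEq α] (x : α) (rest : List α) :
    pvRuns (x :: rest) = (x, pvRunLen x rest + 1) :: pvRuns (rest.drop (pvRunLen x rest)) := by
  simp [pvRuns]

theorem adj_cons_ne {α : Type} [BEq α] [LawfulBEq α] (x : α) (r : List α)
    (h : ∀ y ∈ r.head?, (y == x) = false) : pvAdjC (x :: r) = pvAdjC r := by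
  cases r with
  | nil => rfl
  | cons y t =>
    have hy : (y == x) = false := h y (by simp)
    have : (x == y) = false := by rw [BEq.comm]; exact hy
    simp [pvAdjC, this]

theorem adj_run {α : Type} [BEq α] [LawfulBEq α] (x : α) (t r : List α)
    (ht : ∀ y ∈ t, y = x) (hr : ∀ y ∈ r.head?, (y == x) = false) :
    pvAdjC (x :: (t ++ r)) = t.length + pvAdjC r := by
  induction t with
  | nil => simpa using adj_cons_ne x r hr
  | cons y t' ih =>
    have hy : y = x := ht y (by simp)
    subst hy
    have ih' := ih (fun z hz => ht z (by simp [hz]))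
    simp only [List.cons_append, pvAdjC, BEq.refl, if_pos]
    rw [ih']
    simp; omega

theorem tri_cons_ne {α : Type} [BEq α] [LawfulBEq α] (x : α) (r : List α)
    (h : ∀ y ∈ r.head?, (y == x) = false) : pvTriC (x :: r) = pvTriC r := by
  match r with
  | [] => rfl
  | [y] => rfl
  | y :: z :: t =>
    have hy : (y == x) = false := h y (by simp)
    have : (x == y) = false := by rw [BEq.comm]; exact hy
    simp [pvTriC, this]

theorem tri_run2 {α : Type} [BEq α] [LawfulBEq α] (x : α) (t r : List α)
    (ht : ∀ y ∈ t, y = x) (hr : ∀ y ∈ r.head?, (y == x) = false) :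
    pvTriC (x :: x :: (t ++ r)) = t.length + pvTriC r := by
  induction t with
  | nil =>
    cases r with
    | nil => rfl
    | cons y r' =>
      have hy : (y == x) = false := hr y (by simp)
      have hxy : (x == y) = false := by rw [BEq.comm]; exact hy
      have h1 : pvTriC (x :: y :: r') = pvTriC (y :: r') := tri_cons_ne x (y :: r') hr
      simp only [List.nil_append, pvTriC, BEq.refl, hxy, Bool.true_and]
      rw [h1]
      rcases r' with _ | ⟨z, r''⟩ <;> simp [pvTriC]
  | cons y t' ih =>
    have hy : y = x := ht y (by simp)
    subst hy
    have ih' := ih (fun z hz => ht z (by simp [hz]))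
    simp only [List.cons_append, pvTriC, BEq.refl, Bool.and_self, if_pos]
    rw [ih']
    simp; omega

theorem tri_run {α : Type} [BEq α] [LawfulBEq α] (x : α) (t r : List α)
    (ht : ∀ y ∈ t, y = x) (hr : ∀ y ∈ r.head?, (y == x) = false) :
    pvTriC (x :: (t ++ r)) = (t.length - 1) + pvTriC r := by
  cases t with
  | nil => simpa using tri_cons_ne x r hr
  | cons y t' =>
    have hy : y = x := ht y (by simp)
    subst hy
    have := tri_run2 y t' r (fun z hz => ht z (by simp [hz])) hr
    simpa using this

-- the three decomposition facts for one run starting at x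
theorem runs_decomp {α : Type} [BEq α] [LawfulBEq α] (x : α) (rest : List α) :
    (∀ y ∈ rest.takeWhile (fun y => y == x), y = x) ∧
    rest.takeWhile (fun y => y == x) ++ rest.drop (pvRunLen x rest) = rest ∧
    (∀ y ∈ (rest.drop (pvRunLen x rest)).head?, (y == x) = false) := by
  rw [pvRunLen_eq, drop_takeWhile_len]
  refine ⟨?_, List.takeWhile_append_dropWhile, ?_⟩
  · intro y hy
    have := List.mem_takeWhile_imp hy
    exact eq_of_beq this
  · intro y hy
    simp only [Option.mem_def] at hy
    exact head_dropWhile_false _ rest y hy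

theorem B_adj_aux {α : Type} [BEq α] [LawfulBEq α] :
    ∀ (n : Nat) (l : List α), l.length ≤ n →
    ((pvRuns l).map (fun r => (r.2 : Int) - 1)).sum = (pvAdjC l : Int) := by
  intro n
  induction n with
  | zero =>
    intro l hl
    have : l = [] := List.eq_nil_of_length_eq_zero (Nat.le_zero.mp hl)
    subst this; simp [pvRuns, pvAdjC]
  | succ m ih =>
    intro l hl
    match l with
    | [] => simp [pvRuns, pvAdjC]
    | x :: rest =>
      obtain ⟨ht, hdec, hr⟩ := runs_decomp x rest
      have hlen : (rest.drop (pvRunLen x rest)).length ≤ m := by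
        simp only [List.length_drop]
        simp at hl; omega
      rw [pvRuns_cons]
      simp only [List.map_cons, List.sum_cons]
      rw [ih _ hlen]
      conv_rhs => rw [show x :: rest = x :: ((rest.takeWhile (fun y => y == x)) ++ rest.drop (pvRunLen x rest)) by rw [hdec]]
      rw [adj_run x _ _ ht hr]
      rw [pvRunLen_eq]
      push_cast; ring

theorem B_adj {α : Type} [BEq α] [LawfulBEq α] (l : List α) :
    ((pvRuns l).map (fun r => (r.2 : Int) - 1)).sum = (pvAdjC l : Int) :=
  B_adj_aux l.length l le_rfl

theorem B_tri_aux {α : Type} [BEq α] [LawfulBEq α] :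
    ∀ (n : Nat) (l : List α), l.length ≤ n →
    (((pvRuns l).filter (fun r => decide (2 < r.2))).map (fun r => (r.2 : Int) - 2)).sum = (pvTriC l : Int) := by
  intro n
  induction n with
  | zero =>
    intro l hl
    have : l = [] := List.eq_nil_of_length_eq_zero (Nat.le_zero.mp hl)
    subst this; simp [pvRuns, pvTriC]
  | succ m ih =>
    intro l hl
    match l with
    | [] => simp [pvRuns, pvTriC]
    | x :: rest =>
      obtain ⟨ht, hdec, hr⟩ := runs_decomp x rest
      have hlen : (rest.drop (pvRunLen x rest)).length ≤ m := by
        simp only [List.length_drop]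
        simp at hl; omega
      rw [pvRuns_cons]
      conv_rhs => rw [show x :: rest = x :: ((rest.takeWhile (fun y => y == x)) ++ rest.drop (pvRunLen x rest)) by rw [hdec]]
      rw [tri_run x _ _ ht hr, ← pvRunLen_eq]
      by_cases hk : 2 < pvRunLen x rest + 1
      · rw [List.filter_cons_of_pos (by simpa using hk)]
        simp only [List.map_cons, List.sum_cons]
        rw [ih _ hlen]
        push_cast [Nat.cast_sub (by omega : 1 ≤ pvRunLen x rest)]
        ring
      · rw [List.filter_cons_of_neg (by simpa using hk)]
        rw [ih _ hlen]
        have : pvRunLen x rest - 1 = 0 := by omega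
        rw [this]
        push_cast; ring

theorem B_tri {α : Type} [BEq α] [LawfulBEq α] (l : List α) :
    (((pvRuns l).filter (fun r => decide (2 < r.2))).map (fun r => (r.2 : Int) - 2)).sum = (pvTriC l : Int) :=
  B_tri_aux l.length l le_rfl

-- A-side: append-at-the-back laws for pvAdjC / pvTriC
theorem adj_append {α : Type} [BEq α] (l : List α) (a : α) :
    pvAdjC (l ++ [a]) = pvAdjC l + (match l.getLast? with | some u => if u == a then 1 else 0 | none => 0) := by
  induction l with
  | nil => rfl
  | cons b t ih =>
    cases t with
    | nil => simp [pvAdjC]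
    | cons c t' =>
      simp only [List.cons_append, pvAdjC] at *
      rw [ih]
      simp [List.getLast?_cons_cons]; omega

theorem tri_append {α : Type} [BEq α] (l : List α) (a : α) :
    pvTriC (l ++ [a]) = pvTriC l +
      (match l.getLast?, l.dropLast.getLast? with
       | some u, some v => if v == u && u == a then 1 else 0
       | _, _ => 0) := by
  induction l with
  | nil => rfl
  | cons b t ih =>
    match t with
    | [] => rfl
    | [c] => simp [pvTriC]
    | c :: d :: t' =>
      simp only [List.cons_append, pvTriC] at *
      rw [ih]
      simp only [List.getLast?_cons_cons, List.dropLast_cons₂]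
      omega

theorem pyGetD_append_lt {α : Type} (l : List α) (a : α) (d : α) (i : Int)
    (h0 : 0 ≤ i) (h1 : i < (l.length : Int)) :
    PySem.List.pyGetD (l ++ [a]) i d = PySem.List.pyGetD l i d := by
  rw [PySem.List.pyGetD_eq_getElem _ d h0 (by simp; omega),
      PySem.List.pyGetD_eq_getElem _ d h0 h1]
  exact List.getElem_append_left (by omega)

theorem pyGet?_append_lt {α : Type} (l : List α) (a : α) (i : Int)
    (h0 : 0 ≤ i) (h1 : i < (l.length : Int)) :
    PySem.List.pyGet? (l ++ [a]) i = PySem.List.pyGet? l i := by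
  simp only [PySem.List.pyGet?, PySem.List.pyIdx?, List.length_append, List.length_cons,
    List.length_nil]
  rw [if_pos h0, if_pos h0, if_pos (by push_cast; omega), if_pos h1]
  simp only [Option.bind_some]
  exact List.getElem?_append_left (by omega)

theorem pyGet?_in_range {α : Type} (l : List α) (i : Int) (h0 : 0 ≤ i) (h1 : i < (l.length : Int)) :
    PySem.List.pyGet? l i = l[i.toNat]? := by
  simp only [PySem.List.pyGet?, PySem.List.pyIdx?]
  rw [if_pos h0, if_pos h1]
  simp

theorem A_adj {α : Type} [BEq α] [LawfulBEq α] (l : List α) (d : α) :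
    (PySem.List.pyRange 1 (l.length : Int) 1).foldl
      (fun acc i => if PySem.List.pyGetD l i d == PySem.List.pyGetD l (i-1) d then acc + 1 else acc) 0
    = (pvAdjC l : Int) := by
  induction l using List.reverseRecOn with
  | nil => rw [PySem.List.pyRange_one_eq_nil (by norm_num)]; rfl
  | append_singleton l a ih =>
    rcases eq_or_ne l [] with rfl | hl
    · rw [show ((([] : List α) ++ [a]).length : Int) = 1 by simp,
        PySem.List.pyRange_one_eq_nil le_rfl]
      rfl
    · have hpos : 1 ≤ l.length := List.length_pos_iff.mpr hl
      rw [show (((l ++ [a]).length : Int)) = (l.length : Int) + 1 by simp,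
        PySem.List.pyRange_one_succ_right (by exact_mod_cast hpos), List.foldl_append]
      have hcong := PySem.List.foldl_congr_mem (PySem.List.pyRange 1 (l.length : Int) 1)
        (fun acc i => if PySem.List.pyGetD (l ++ [a]) i d == PySem.List.pyGetD (l ++ [a]) (i-1) d then acc + 1 else acc)
        (fun acc i => if PySem.List.pyGetD l i d == PySem.List.pyGetD l (i-1) d then acc + 1 else acc)
        (0 : Int) ?_
      · rw [hcong, ih]
        simp only [List.foldl_cons, List.foldl_nil]
        have e1 : PySem.List.pyGetD (l ++ [a]) ((l.length : Int)) d = a := by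
          rw [PySem.List.pyGetD_eq_getElem _ d (by positivity) (by simp)]
          simp
        have e2 : PySem.List.pyGetD (l ++ [a]) ((l.length : Int) - 1) d = l.getLast hl := by
          rw [PySem.List.pyGetD_eq_getElem _ d (by omega)
            (by simp only [List.length_append, List.length_cons, List.length_nil]; push_cast; omega)]
          have ht : ((l.length : Int) - 1).toNat = l.length - 1 := by omega
          simp only [ht]
          rw [List.getElem_append_left (by omega)]
          exact (List.getLast_eq_getElem hl).symm
        rw [e1, e2, adj_append l a, List.getLast?_eq_some_getLast hl]
        simp only
        rw [BEq.comm (a := a) (b := l.getLast hl)]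
        by_cases hc : (l.getLast hl == a) <;> simp [hc]
      · intro acc i hi
        have hmem := (PySem.List.mem_pyRange_one).mp hi
        simp only []
        rw [pyGetD_append_lt l a d i (by omega) (by omega),
            pyGetD_append_lt l a d (i - 1) (by omega) (by omega)]

theorem A_tri {α : Type} [BEq α] [LawfulBEq α] (l : List α) :
    (PySem.List.pyRange 2 (l.length : Int) 1).foldl
      (fun acc i => if (PySem.List.pyGet? l i == PySem.List.pyGet? l (i-1)) &&
                       (PySem.List.pyGet? l (i-1) == PySem.List.pyGet? l (i-2)) then acc + 1 else acc) 0
    = (pvTriC l : Int) := by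
  induction l using List.reverseRecOn with
  | nil => rw [PySem.List.pyRange_one_eq_nil (by norm_num)]; rfl
  | append_singleton l a ih =>
    by_cases hsmall : l.length ≤ 1
    · match l, hsmall with
      | [], _ => rw [show ((([] : List α) ++ [a]).length : Int) = 1 by simp,
          PySem.List.pyRange_one_eq_nil (by norm_num)]; rfl
      | [b], _ => rw [show ((([b] : List α) ++ [a]).length : Int) = 2 by simp,
          PySem.List.pyRange_one_eq_nil le_rfl]; rfl
    · have h2 : 2 ≤ l.length := by omega
      have hl : l ≠ [] := by intro h; subst h; simp at h2
      have hdne : l.dropLast ≠ [] := by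
        intro h
        have := congrArg List.length h
        simp only [List.length_dropLast, List.length_nil] at this
        omega
      rw [show (((l ++ [a]).length : Int)) = (l.length : Int) + 1 by simp,
        PySem.List.pyRange_one_succ_right (by exact_mod_cast h2), List.foldl_append]
      have hcong := PySem.List.foldl_congr_mem (PySem.List.pyRange 2 (l.length : Int) 1)
        (fun acc i => if (PySem.List.pyGet? (l ++ [a]) i == PySem.List.pyGet? (l ++ [a]) (i-1)) &&
                         (PySem.List.pyGet? (l ++ [a]) (i-1) == PySem.List.pyGet? (l ++ [a]) (i-2)) then acc + 1 else acc)
        (fun acc i => if (PySem.List.pyGet? l i == PySem.List.pyGet? l (i-1)) &&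
                         (PySem.List.pyGet? l (i-1) == PySem.List.pyGet? l (i-2)) then acc + 1 else acc)
        (0 : Int) ?_
      · rw [hcong, ih]
        simp only [List.foldl_cons, List.foldl_nil]
        have g1 : PySem.List.pyGet? (l ++ [a]) ((l.length : Int)) = some a := by
          rw [pyGet?_in_range _ _ (by positivity)
            (by simp only [List.length_append, List.length_cons, List.length_nil]; push_cast; omega)]
          simp
        have g2 : PySem.List.pyGet? (l ++ [a]) ((l.length : Int) - 1) = some (l.getLast hl) := by
          rw [pyGet?_in_range _ _ (by omega)
            (by simp only [List.length_append, List.length_cons, List.length_nil]; push_cast; omega)]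
          rw [show ((l.length : Int) - 1).toNat = l.length - 1 from by omega,
            List.getElem?_append_left (by omega), List.getElem?_eq_getElem (by omega)]
          rw [List.getLast_eq_getElem hl]
        have g3 : PySem.List.pyGet? (l ++ [a]) ((l.length : Int) - 2) = some (l.dropLast.getLast hdne) := by
          rw [pyGet?_in_range _ _ (by omega)
            (by simp only [List.length_append, List.length_cons, List.length_nil]; push_cast; omega)]
          rw [show ((l.length : Int) - 2).toNat = l.length - 2 from by omega,
            List.getElem?_append_left (by omega), List.getElem?_eq_getElem (by omega)]
          rw [List.getLast_eq_getElem hdne]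
          congr 1
          rw [List.getElem_dropLast]
          congr 1
          simp only [List.length_dropLast]
          omega
        rw [g1, g2, g3, tri_append l a, List.getLast?_eq_some_getLast hl,
          List.getLast?_eq_some_getLast hdne]
        simp only
        generalize l.getLast hl = u at *
        generalize l.dropLast.getLast hdne = v at *
        rcases eq_or_ne a u with rfl | h1
        · rcases eq_or_ne a v with rfl | h2
          · simp
          · simp [beq_iff_eq, h2, Ne.symm h2]
        · rcases eq_or_ne u v with rfl | h2
          · simp [beq_iff_eq, h1, Ne.symm h1]
          · simp [beq_iff_eq, h1, Ne.symm h2]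
      · intro acc i hi
        have hmem := (PySem.List.mem_pyRange_one).mp hi
        simp only []
        rw [pyGet?_append_lt l a i (by omega) (by omega),
            pyGet?_append_lt l a (i-1) (by omega) (by omega),
            pyGet?_append_lt l a (i-2) (by omega) (by omega)]

theorem fillers_nat (ws : List String) :
    ws.count "um" + ws.count "uh" + ws.count "like" + ws.count "basically" + ws.count "well"
    = (ws.filter (fun w => decide (w ∈ ["um", "uh", "like", "basically", "well"]))).length := by
  induction ws with
  | nil => rfl
  | cons w t ih =>
    simp only [List.count_cons, List.filter_cons]
    by_cases h : w ∈ ["um", "uh", "like", "basically", "well"]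
    · simp only [List.mem_cons, List.not_mem_nil, or_false] at h
      rcases h with rfl | rfl | rfl | rfl | rfl <;> simp <;> (try simp at ih) <;> omega
    · simp only [List.mem_cons, List.not_mem_nil, or_false, not_or] at h
      obtain ⟨h1, h2, h3, h4, h5⟩ := h
      simp [h1, h2, h3, h4, h5, beq_iff_eq]
      simp at ih
      omega

theorem fillers_eq (ws : List String) :
    (["um", "uh", "like", "basically", "well"].foldl (fun acc f => acc + ((ws.count f : Int))) 0)
    = ((ws.filter (fun w => decide (w ∈ ["um", "uh", "like", "basically", "well"]))).length : Int) := by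
  simp only [List.foldl_cons, List.foldl_nil]
  rw [← fillers_nat ws]
  push_cast
  ring

theorem prol_eq (low : String) :
    (["a", "e", "i", "o", "u", "r", "s", "l"].foldl
      (fun acc ch => if PySem.Str.isIn (pvTriple ch) low then acc + (PySem.Str.count low (pvTriple ch) : Int) else acc) 0)
    = (("aeioursl".toList).map
        (fun c => if PySem.Str.isIn (String.ofList [c, c, c]) low then (PySem.Str.count low (String.ofList [c, c, c]) : Int) else 0)).sum := by
  have h1 : (["a", "e", "i", "o", "u", "r", "s", "l"].foldl
      (fun acc ch => if PySem.Str.isIn (pvTriple ch) low then acc + (PySem.Str.count low (pvTriple ch) : Int) else acc) 0)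
      = ((["a", "e", "i", "o", "u", "r", "s", "l"].map
          (fun ch => if PySem.Str.isIn (pvTriple ch) low then (PySem.Str.count low (pvTriple ch) : Int) else 0)).sum) := by
    rw [PySem.List.foldl_congr_mem _ _
      (fun acc ch => acc + (if PySem.Str.isIn (pvTriple ch) low then (PySem.Str.count low (pvTriple ch) : Int) else 0)) 0 ?_]
    · rw [PySem.List.foldl_add]; ring
    · intro acc x _
      simp only []
      split <;> rename_i h <;> simp
  rw [h1]
  rfl

-- ===== VERDICT (by name: the statement is the Claim_ definition above) =====
theorem calculate_stuttering_metrics_spec : Claim_equal_calculate_stuttering_metrics := by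
  intro original corrected _
  unfold Spec_calculate_stuttering_metrics
  have h1 : ∀ s : String,
      (PySem.List.pyRange 1 ((PySem.Str.split₀ (PySem.Str.lower s)).length : Int) 1).foldl
        (fun acc i => if PySem.List.pyGetD (PySem.Str.split₀ (PySem.Str.lower s)) i "" ==
            PySem.List.pyGetD (PySem.Str.split₀ (PySem.Str.lower s)) (i-1) "" then acc + 1 else acc) 0
      = ((pvRuns (PySem.Str.split₀ (PySem.Str.lower s))).map (fun r => (r.2 : Int) - 1)).sum :=
    fun s => (A_adj _ "").trans (B_adj _).symm
  have h2 : ∀ s : String,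
      (PySem.List.pyRange 2 (PySem.Str.len s) 1).foldl
        (fun acc i => if (PySem.Str.pyGet? s i == PySem.Str.pyGet? s (i-1)) &&
            (PySem.Str.pyGet? s (i-1) == PySem.Str.pyGet? s (i-2)) then acc + 1 else acc) 0
      = (((pvRuns s.toList).filter (fun r => decide (2 < r.2))).map (fun r => (r.2 : Int) - 2)).sum :=
    fun s => (A_tri s.toList).trans (B_tri s.toList).symm
  have h4 : ∀ ws : List String,
      (["um", "uh", "like", "basically", "well"].foldl (fun acc f => acc + ((ws.count f : Int))) 0)
      = ((ws.filter (fun w => decide (w ∈ ["um", "uh", "like", "basically", "well"]))).length : Int) :=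
    fillers_eq
  simp only [calculate_stuttering_metrics, calculate_stuttering_metrics_alt, pvCounts]
  rw [h1 original, h1 corrected, h2 original, h2 corrected,
    prol_eq (PySem.Str.lower original), prol_eq (PySem.Str.lower corrected),
    h4 (PySem.Str.split₀ (PySem.Str.lower original)), h4 (PySem.Str.split₀ (PySem.Str.lower corrected))]
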